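-- pv_equiv track=rewrite | github.com/Ray70607/graph_grouping | mar15 linerprogram 初步结果 .py | max_abs_index
-- ===== SOURCE A (Python) =====
-- def max_abs_index(arr):
--     max_abs = float('-inf')  # Initialize max absolute value to negative infinity
--     max_abs_index = None     # Initialize index of max absolute value to None
--
--     for i in range(len(arr)):
--         abs_value = abs(arr[i])
--         if abs_value > max_abs:
--             max_abs = abs_value
--             max_abs_index = i
--
--     return max_abs_index
-- ===== SOURCE B (Python) =====
-- def max_abs_index(arr):
--     absvals = [abs(x) for x in arr]
--     if not absvals:
--         return None
--     m = max(absvals)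
--     return absvals.index(m)
-- ===== Notes on version B (the rewrite author's own statement) =====
-- stated objective: simpler
-- what changed: Replaces A's single running-max scan with explicit index/sentinel state by three library passes: build the list of absolute values, take max(), and return its first index via .index().
import Mathlib
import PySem

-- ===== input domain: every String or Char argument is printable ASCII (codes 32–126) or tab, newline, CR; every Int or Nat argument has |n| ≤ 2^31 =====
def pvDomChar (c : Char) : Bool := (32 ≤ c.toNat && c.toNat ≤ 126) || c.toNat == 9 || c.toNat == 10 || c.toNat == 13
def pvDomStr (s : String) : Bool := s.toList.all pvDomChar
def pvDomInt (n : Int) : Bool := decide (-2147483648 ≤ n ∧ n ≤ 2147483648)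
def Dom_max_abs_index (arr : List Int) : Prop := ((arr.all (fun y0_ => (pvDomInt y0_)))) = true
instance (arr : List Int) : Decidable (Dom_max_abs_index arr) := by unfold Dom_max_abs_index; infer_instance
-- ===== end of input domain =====

-- B replaces A's single running-max scan with explicit sentinel/index state by three
-- library passes: map abs, max(), then first index via .index() (objective: simpler).


-- ===== PORT A =====
-- state: (max_abs, max_abs_index); none for max_abs is Python's float('-inf') sentinel
def maxAbsLoop : List Int → Int → Option Int → Option Int → Option Int
  | [], _, _, mi => mi
  | x :: xs, i, mb, mi =>
    let a := |x|
    match mb with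
    | none => maxAbsLoop xs (i + 1) (some a) (some i)
    | some m => if m < a then maxAbsLoop xs (i + 1) (some a) (some i)
                else maxAbsLoop xs (i + 1) (some m) mi

def max_abs_index (arr : List Int) : Option Int :=
  maxAbsLoop arr 0 none none

-- ===== PORT B =====
def max_abs_index_alt (arr : List Int) : Option Int :=
  let absvals := arr.map (fun x => |x|)
  if absvals.isEmpty then none
  else
    match PySem.List.max? absvals (fun y => y) with
    | none => none
    | some m => (PySem.List.index? absvals m).map (fun k => (k : Int))

-- ===== PRECONDITION & SPEC =====
def Spec_max_abs_index (arr : List Int) (out : Option Int) : Prop := out = max_abs_index_alt arr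
instance (arr : List Int) (out : Option Int) : Decidable (Spec_max_abs_index arr out) := by unfold Spec_max_abs_index; infer_instance

-- ===== CLAIM (what is proved, stated in full; the proofs are below) =====
def Claim_equal_max_abs_index : Prop := ∀ (arr : List Int), Dom_max_abs_index arr → Spec_max_abs_index arr (max_abs_index arr)

-- ===== LEMMAS AND PROOFS =====

-- A's loop with a concrete best value b and saved result j: it returns j unless the
-- running max M of the remaining absolute values beats b, in which case it returns
-- i + (first index of M in the remaining absolute values).
theorem maxAbsLoop_some (xs : List Int) : ∀ (i b : Int) (j : Option Int),
    maxAbsLoop xs i (some b) j =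
      (if b < (xs.map (fun x => |x|)).foldl max b then
        (PySem.List.index? (xs.map (fun x => |x|)) ((xs.map (fun x => |x|)).foldl max b)).map
          (fun k => i + (k : Int))
      else j) := by
  induction xs with
  | nil => intro i b j; simp [maxAbsLoop]
  | cons x xs ih =>
    intro i b j
    simp only [maxAbsLoop, List.map_cons, List.foldl_cons]
    by_cases hba : b < |x|
    · rw [if_pos hba, max_eq_right (le_of_lt hba), ih]
      have hle := (PySem.List.le_foldl_max (xs.map (fun x => |x|)) |x|).1
      have hb : b < (xs.map (fun x => |x|)).foldl max |x| := lt_of_lt_of_le hba hle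
      rw [if_pos hb]
      by_cases hxM : |x| < (xs.map (fun x => |x|)).foldl max |x|
      · rw [if_pos hxM, PySem.List.index?_cons_of_ne _ (ne_of_lt hxM)]
        cases PySem.List.index? (xs.map (fun x => |x|)) ((xs.map (fun x => |x|)).foldl max |x|) with
        | none => simp
        | some k => simp; ring
      · have hM : (xs.map (fun x => |x|)).foldl max |x| = |x| := le_antisymm (not_lt.mp hxM) hle
        rw [if_neg hxM, hM, PySem.List.index?_cons_self]
        simp
    · rw [if_neg hba, max_eq_left (not_lt.mp hba), ih]
      by_cases hbM : b < (xs.map (fun x => |x|)).foldl max b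
      · rw [if_pos hbM, if_pos hbM]
        have hxM : |x| ≠ (xs.map (fun x => |x|)).foldl max b :=
          ne_of_lt (lt_of_le_of_lt (not_lt.mp hba) hbM)
        rw [PySem.List.index?_cons_of_ne _ hxM]
        cases PySem.List.index? (xs.map (fun x => |x|)) ((xs.map (fun x => |x|)).foldl max b) with
        | none => simp
        | some k => simp; ring
      · rw [if_neg hbM, if_neg hbM]

-- ===== VERDICT (by name: the statement is the Claim_ definition above) =====
theorem max_abs_index_spec : Claim_equal_max_abs_index := by
  intro arr _
  unfold Spec_max_abs_index max_abs_index max_abs_index_alt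
  cases arr with
  | nil => simp [maxAbsLoop]
  | cons x xs =>
    simp only [maxAbsLoop, List.map_cons, List.isEmpty_cons, if_neg Bool.false_ne_true,
      PySem.List.max?_id_cons]
    rw [maxAbsLoop_some]
    have hle := (PySem.List.le_foldl_max (xs.map (fun x => |x|)) |x|).1
    by_cases hxM : |x| < (xs.map (fun x => |x|)).foldl max |x|
    · rw [if_pos hxM, PySem.List.index?_cons_of_ne _ (ne_of_lt hxM)]
      cases PySem.List.index? (xs.map (fun x => |x|)) ((xs.map (fun x => |x|)).foldl max |x|) with
      | none => simp
      | some k => simp; ring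
    · have hM : (xs.map (fun x => |x|)).foldl max |x| = |x| := le_antisymm (not_lt.mp hxM) hle
      rw [if_neg hxM, hM, PySem.List.index?_cons_self]
      simp
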